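-- pv_equiv track=rewrite | github.com/yechankun/Algorithm | programmers/pg_level3_4.py | solution
-- ===== SOURCE A (Python) =====
-- def solution(a):
--     if len(a)<3:
--         return len(a)
--     answer = 0
--     left_min = []
--     right_min = []
--
--     n_min = 1000000001
--     for i in a:
--         if n_min>i:
--             n_min = i
--         left_min.append(n_min)
--     n_min = 1000000001
--     for i in a[::-1]:
--         if n_min>i:
--             n_min = i
--         right_min.append(n_min)
--     right_min.reverse()
--
--     answer+=2
--     for i in range(1, len(a)-1):
--         if a[i]<max(left_min[i-1],right_min[i+1]):
--             answer+=1
--     return answer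
-- ===== SOURCE B (Python) =====
-- def solution(a):
--     n = len(a)
--     if n < 3:
--         return n
--     # an interior element beats max(prefix-min, suffix-min) iff it is a strict
--     # prefix-record or a strict suffix-record; collect those indices once each
--     picked = set()
--     cur = 1000000001
--     for i, x in enumerate(a):
--         if 0 < i < n - 1 and x < cur:
--             picked.add(i)
--         if x < cur:
--             cur = x
--     cur = 1000000001
--     for i, x in reversed(list(enumerate(a))):
--         if 0 < i < n - 1 and x < cur:
--             picked.add(i)
--         if x < cur:
--             cur = x
--     return 2 + len(picked)
-- ===== Notes on version B (the rewrite author's own statement) =====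
-- stated objective: simpler
-- what changed: B drops A's two materialized min-arrays and the third max-comparison pass: using a[i] < max(x,y) iff a[i] < x or a[i] < y, it marks interior strict prefix-records in one forward scan and interior strict suffix-records in one backward scan into a single set and returns 2 plus its size.
import Mathlib
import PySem

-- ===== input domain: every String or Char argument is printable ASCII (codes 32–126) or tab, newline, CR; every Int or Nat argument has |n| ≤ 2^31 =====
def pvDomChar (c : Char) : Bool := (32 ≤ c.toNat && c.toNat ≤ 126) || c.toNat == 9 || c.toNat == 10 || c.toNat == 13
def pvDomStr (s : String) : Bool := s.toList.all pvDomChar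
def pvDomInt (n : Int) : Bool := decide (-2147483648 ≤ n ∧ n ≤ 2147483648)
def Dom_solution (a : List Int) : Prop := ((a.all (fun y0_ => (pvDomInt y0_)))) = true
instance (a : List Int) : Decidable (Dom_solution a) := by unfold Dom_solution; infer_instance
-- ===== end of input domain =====

-- B replaces A's two min-arrays and max-comparison pass by two record-scans that
-- collect qualifying interior indices into one set (simpler decomposition, same cost).

-- ===== PORT A =====
def solution (a : List Int) : Int :=
  if a.length < 3 then (a.length : Int) else
    let answer : Int := 0
    let st1 : Int × List Int := a.foldl (fun st i =>
        let n_min := if st.1 > i then i else st.1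
        (n_min, st.2 ++ [n_min])) (1000000001, ([] : List Int))
    let left_min := st1.2
    -- a[::-1] is PySem.List.slice? with step -1 (never none for step -1)
    let st2 : Int × List Int := ((PySem.List.slice? a none none (-1)).getD []).foldl (fun st i =>
        let n_min := if st.1 > i then i else st.1
        (n_min, st.2 ++ [n_min])) (1000000001, ([] : List Int))
    let right_min := st2.2.reverse
    let answer := answer + 2
    (PySem.List.pyRange 1 ((a.length : Int) - 1) 1).foldl (fun ans i =>
      if PySem.List.pyGetD a i 0 <
          max (PySem.List.pyGetD left_min (i - 1) 0) (PySem.List.pyGetD right_min (i + 1) 0)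
      then ans + 1 else ans) answer

-- ===== PORT B =====
def solution_alt (a : List Int) : Int :=
  let n : Int := (a.length : Int)
  if n < 3 then n else
    let st1 : PySem.Set Int × Int := (PySem.List.enumerate a).foldl (fun st p =>
        let picked := if 0 < p.1 ∧ p.1 < n - 1 ∧ p.2 < st.2 then PySem.Set.add st.1 p.1 else st.1
        let cur := if p.2 < st.2 then p.2 else st.2
        (picked, cur)) (PySem.Set.empty, 1000000001)
    let st2 : PySem.Set Int × Int := ((PySem.List.enumerate a).reverse).foldl (fun st p =>
        let picked := if 0 < p.1 ∧ p.1 < n - 1 ∧ p.2 < st.2 then PySem.Set.add st.1 p.1 else st.1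
        let cur := if p.2 < st.2 then p.2 else st.2
        (picked, cur)) (st1.1, 1000000001)
    2 + PySem.Set.len st2.1

-- ===== PRECONDITION & SPEC =====
def Spec_solution (a : List Int) (out : Int) : Prop := out = solution_alt a
instance (a : List Int) (out : Int) : Decidable (Spec_solution a out) := by unfold Spec_solution; infer_instance

-- ===== CLAIM (what is proved, stated in full; the proofs are below) =====
def Claim_equal_solution : Prop := ∀ (a : List Int), Dom_solution a → Spec_solution a (solution a)

-- ===== LEMMAS AND PROOFS =====

/-- The running minimum both programs maintain (sentinel-seeded prefix minimum). -/
def pvM (m : Int) (l : List Int) : Int := l.foldl (fun s x => if s > x then x else s) m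

/-- The list of running minima A appends (`left_min` for `l = a`). -/
def pvLmins (m : Int) : List Int → List Int
  | [] => []
  | x :: xs => (if m > x then x else m) :: pvLmins (if m > x then x else m) xs

/-- B's loop body, with the length `n` fixed. -/
def pvStep (n : Int) (st : PySem.Set Int × Int) (p : Int × Int) : PySem.Set Int × Int :=
  let picked := if 0 < p.1 ∧ p.1 < n - 1 ∧ p.2 < st.2 then PySem.Set.add st.1 p.1 else st.1
  let cur := if p.2 < st.2 then p.2 else st.2
  (picked, cur)

lemma pvFoldA (l : List Int) (m : Int) (acc : List Int) :
    l.foldl (fun (st : Int × List Int) i =>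
        let n_min := if st.1 > i then i else st.1
        (n_min, st.2 ++ [n_min])) (m, acc) = (pvM m l, acc ++ pvLmins m l) := by
  induction l generalizing m acc with
  | nil => simp [pvM, pvLmins]
  | cons x xs ih => simp [List.foldl_cons, ih, pvM, pvLmins]

lemma pvLmins_length (m : Int) (l : List Int) : (pvLmins m l).length = l.length := by
  induction l generalizing m with
  | nil => rfl
  | cons x xs ih => simp [pvLmins, ih]

lemma pvLmins_getElem (m : Int) (l : List Int) (k : Nat) (hk : k < l.length)
    (hk' : k < (pvLmins m l).length) :
    (pvLmins m l)[k] = pvM m (l.take (k + 1)) := by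
  induction l generalizing m k with
  | nil => simp at hk
  | cons x xs ih =>
    cases k with
    | zero => simp [pvLmins, pvM]
    | succ k =>
      have hk2 : k < xs.length := by simpa using hk
      simp only [pvLmins, List.getElem_cons_succ, List.take_succ_cons]
      rw [ih _ k hk2 (by simpa [pvLmins_length] using hk2)]
      rfl

lemma pvFwd (n : Int) (l : List Int) (j : Int) (s : PySem.Set Int) (m : Int) (hs : s.Nodup) :
    ((PySem.List.enumerate l j).foldl (pvStep n) (s, m)).2 = pvM m l ∧
    ((PySem.List.enumerate l j).foldl (pvStep n) (s, m)).1.Nodup ∧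
    (∀ y : Int, y ∈ ((PySem.List.enumerate l j).foldl (pvStep n) (s, m)).1 ↔
      y ∈ s ∨ ∃ (k : Nat) (h : k < l.length),
        y = j + (k : Int) ∧ 0 < y ∧ y < n - 1 ∧ l[k] < pvM m (l.take k)) := by
  induction l generalizing j s m with
  | nil => simpa [pvM] using hs
  | cons x xs ih =>
    rw [PySem.List.enumerate_cons, List.foldl_cons]
    have hstep : pvStep n (s, m) (j, x) =
        ((if 0 < j ∧ j < n - 1 ∧ x < m then PySem.Set.add s j else s),
         (if x < m then x else m)) := rfl
    rw [hstep]
    have hs' : (if 0 < j ∧ j < n - 1 ∧ x < m then PySem.Set.add s j else s).Nodup := by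
      split
      · exact PySem.Set.nodup_add s j hs
      · exact hs
    obtain ⟨h2, hnd, hmem⟩ := ih (j + 1) _ (if x < m then x else m) hs'
    have hM : pvM (if x < m then x else m) xs = pvM m (x :: xs) := rfl
    refine ⟨by rw [h2, hM], hnd, ?_⟩
    intro y
    rw [hmem y]
    constructor
    · rintro (hy | ⟨k, hk, rfl, hy1, hy2, hy3⟩)
      · by_cases hc : 0 < j ∧ j < n - 1 ∧ x < m
        · rw [if_pos hc] at hy
          rcases (PySem.Set.mem_add s j y).mp hy with hy | rfl
          · exact Or.inl hy
          · exact Or.inr ⟨0, by simp, by omega, hc.1, hc.2.1, by simpa [pvM] using hc.2.2⟩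
        · rw [if_neg hc] at hy; exact Or.inl hy
      · refine Or.inr ⟨k + 1, by simpa using hk, by push_cast; ring, hy1, hy2, ?_⟩
        have : pvM m ((x :: xs).take (k + 1)) = pvM (if x < m then x else m) (xs.take k) := rfl
        rw [this]; simpa using hy3
    · rintro (hy | ⟨k, hk, rfl, hy1, hy2, hy3⟩)
      · refine Or.inl ?_
        split
        · exact (PySem.Set.mem_add s j y).mpr (Or.inl hy)
        · exact hy
      · cases k with
        | zero =>
          refine Or.inl ?_
          have hc : 0 < j ∧ j < n - 1 ∧ x < m := by
            refine ⟨by omega, by omega, ?_⟩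
            simpa [pvM] using hy3
          rw [if_pos hc]
          exact (PySem.Set.mem_add s j _).mpr (Or.inr (by omega))
        | succ k =>
          refine Or.inr ⟨k, by simpa using hk, by push_cast; ring, hy1, hy2, ?_⟩
          have : pvM m ((x :: xs).take (k + 1)) = pvM (if x < m then x else m) (xs.take k) := rfl
          rw [← this]; simpa using hy3

lemma pvBwd (n : Int) (l : List Int) (j : Int) (s : PySem.Set Int) (m : Int) (hs : s.Nodup) :
    (((PySem.List.enumerate l j).reverse).foldl (pvStep n) (s, m)).2 = pvM m l.reverse ∧
    (((PySem.List.enumerate l j).reverse).foldl (pvStep n) (s, m)).1.Nodup ∧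
    (∀ y : Int, y ∈ (((PySem.List.enumerate l j).reverse).foldl (pvStep n) (s, m)).1 ↔
      y ∈ s ∨ ∃ (k : Nat) (h : k < l.length),
        y = j + (k : Int) ∧ 0 < y ∧ y < n - 1 ∧ l[k] < pvM m ((l.drop (k + 1)).reverse)) := by
  induction l generalizing j with
  | nil => simpa [pvM] using hs
  | cons x xs ih =>
    rw [PySem.List.enumerate_cons, List.reverse_cons, List.foldl_append]
    obtain ⟨h2, hnd, hmem⟩ := ih (j + 1)
    set r := ((PySem.List.enumerate xs (j + 1)).reverse).foldl (pvStep n) (s, m) with hr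
    have hstep : pvStep n r (j, x) =
        ((if 0 < j ∧ j < n - 1 ∧ x < r.2 then PySem.Set.add r.1 j else r.1),
         (if x < r.2 then x else r.2)) := rfl
    simp only [List.foldl_cons, List.foldl_nil, hstep]
    have hM2 : (if x < r.2 then x else r.2) = pvM m (x :: xs).reverse := by
      rw [h2]
      simp only [List.reverse_cons, pvM, List.foldl_append, List.foldl_cons, List.foldl_nil]
    refine ⟨hM2, ?_, ?_⟩
    · split
      · exact PySem.Set.nodup_add r.1 j hnd
      · exact hnd
    intro y
    have hcond : (x < r.2) ↔ x < pvM m ((x :: xs).drop 1).reverse := by rw [h2]; rfl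
    constructor
    · intro hy
      by_cases hc : 0 < j ∧ j < n - 1 ∧ x < r.2
      · rw [if_pos hc] at hy
        rcases (PySem.Set.mem_add r.1 j y).mp hy with hy | rfl
        · rcases (hmem y).mp hy with hy | ⟨k, hk, rfl, hy1, hy2, hy3⟩
          · exact Or.inl hy
          · exact Or.inr ⟨k + 1, by simpa using hk, by push_cast; ring, hy1, hy2, by simpa using hy3⟩
        · exact Or.inr ⟨0, by simp, by omega, hc.1, hc.2.1, by simpa using hcond.mp hc.2.2⟩
      · rw [if_neg hc] at hy
        rcases (hmem y).mp hy with hy | ⟨k, hk, rfl, hy1, hy2, hy3⟩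
        · exact Or.inl hy
        · exact Or.inr ⟨k + 1, by simpa using hk, by push_cast; ring, hy1, hy2, by simpa using hy3⟩
    · rintro (hy | ⟨k, hk, rfl, hy1, hy2, hy3⟩)
      · have : y ∈ r.1 := (hmem y).mpr (Or.inl hy)
        split
        · exact (PySem.Set.mem_add r.1 j y).mpr (Or.inl this)
        · exact this
      · cases k with
        | zero =>
          have hc : 0 < j ∧ j < n - 1 ∧ x < r.2 := by
            refine ⟨by omega, by omega, hcond.mpr (by simpa using hy3)⟩
          rw [if_pos hc]
          exact (PySem.Set.mem_add r.1 j _).mpr (Or.inr (by omega))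
        | succ k =>
          have : (j + (↑(k + 1) : Int)) ∈ r.1 :=
            (hmem _).mpr (Or.inr ⟨k, by simpa using hk, by push_cast; ring, hy1, hy2, by simpa using hy3⟩)
          split
          · exact (PySem.Set.mem_add r.1 j _).mpr (Or.inl this)
          · exact this

lemma pvCountIf (P : Int → Prop) [DecidablePred P] (l : List Int) (init : Int) :
    l.foldl (fun ans i => if P i then ans + 1 else ans) init
      = init + (l.countP (fun i => decide (P i)) : Int) := by
  rw [show (fun (ans : Int) i => if P i then ans + 1 else ans)
        = (fun (ans : Int) i => if (fun i => decide (P i)) i = true then ans + 1 else ans) from by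
      funext ans i; simp]
  exact PySem.List.foldl_count_if _ _ init

lemma pvAEq (a : List Int) (h : ¬ a.length < 3) :
    solution a = (PySem.List.pyRange 1 ((a.length : Int) - 1) 1).foldl (fun ans i =>
      if PySem.List.pyGetD a i 0 <
          max (PySem.List.pyGetD (pvLmins 1000000001 a) (i - 1) 0)
              (PySem.List.pyGetD ((pvLmins 1000000001 a.reverse).reverse) (i + 1) 0)
      then ans + 1 else ans) (0 + 2) := by
  simp only [solution, if_neg h, PySem.List.slice?_none_none_neg_one, Option.getD_some,
    pvFoldA, List.nil_append]

lemma pvAltEq (a : List Int) (h : ¬ a.length < 3) :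
    solution_alt a = 2 + PySem.Set.len
      ((((PySem.List.enumerate a).reverse).foldl (pvStep (a.length : Int))
        (((PySem.List.enumerate a).foldl (pvStep (a.length : Int))
            (PySem.Set.empty, 1000000001)).1, 1000000001)).1) := by
  have h' : ¬ ((a.length : Int) < 3) := by exact_mod_cast h
  simp only [solution_alt, if_neg h']
  rfl

lemma pvCondIff (a : List Int) (y : Int) (h1 : 1 ≤ y) (h2 : y < (a.length : Int) - 1) :
    (PySem.List.pyGetD a y 0 <
      max (PySem.List.pyGetD (pvLmins 1000000001 a) (y - 1) 0)
          (PySem.List.pyGetD ((pvLmins 1000000001 a.reverse).reverse) (y + 1) 0))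
    ↔ ((a.getD y.toNat 0 < pvM 1000000001 (a.take y.toNat)) ∨
       (a.getD y.toNat 0 < pvM 1000000001 ((a.drop (y.toNat + 1)).reverse))) := by
  have hyn : y.toNat < a.length := by omega
  have hLMlen : (pvLmins 1000000001 a).length = a.length := pvLmins_length _ _
  have hRlen : (pvLmins 1000000001 a.reverse).length = a.length := by
    rw [pvLmins_length, List.length_reverse]
  rw [PySem.List.pyGetD_eq_getElem a 0 (by omega) (by omega)]
  rw [PySem.List.pyGetD_eq_getElem (pvLmins 1000000001 a) 0 (by omega)
    (by rw [hLMlen]; omega)]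
  rw [PySem.List.pyGetD_eq_getElem ((pvLmins 1000000001 a.reverse).reverse) 0 (by omega)
    (by rw [List.length_reverse, hRlen]; omega)]
  rw [List.getElem_reverse]
  rw [pvLmins_getElem _ _ _ (by omega) (by omega)]
  rw [pvLmins_getElem _ _ _ (by rw [List.length_reverse]; omega) (by rw [hRlen]; omega)]
  rw [show (y - 1).toNat + 1 = y.toNat from by omega]
  rw [show (pvLmins 1000000001 a.reverse).length - 1 - (y + 1).toNat + 1
        = a.length - (y.toNat + 1) from by rw [hRlen]; omega]
  rw [show a.reverse.take (a.length - (y.toNat + 1)) = (a.drop (y.toNat + 1)).reverse from by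
    rw [List.reverse_drop]]
  rw [List.getD_eq_getElem a 0 hyn]
  exact lt_max_iff

-- ===== VERDICT (by name: the statement is the Claim_ definition above) =====
theorem solution_spec : Claim_equal_solution := by
  intro a _
  show solution a = solution_alt a
  by_cases h : a.length < 3
  · have h' : ((a.length : Int) < 3) := by exact_mod_cast h
    simp [solution, solution_alt, if_pos h, h']
  · have h' : ¬ ((a.length : Int) < 3) := by exact_mod_cast h
    rw [pvAEq a h, pvAltEq a h]
    obtain ⟨hf2, hfnd, hfmem⟩ :=
      pvFwd (a.length : Int) a 0 PySem.Set.empty 1000000001 List.nodup_nil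
    obtain ⟨hb2, hbnd, hbmem⟩ :=
      pvBwd (a.length : Int) a 0
        ((PySem.List.enumerate a).foldl (pvStep (a.length : Int))
          (PySem.Set.empty, 1000000001)).1 1000000001 hfnd
    rw [pvCountIf]
    set P : Int → Prop := fun i =>
      PySem.List.pyGetD a i 0 <
        max (PySem.List.pyGetD (pvLmins 1000000001 a) (i - 1) 0)
            (PySem.List.pyGetD ((pvLmins 1000000001 a.reverse).reverse) (i + 1) 0) with hP
    set S := (((PySem.List.enumerate a).reverse).foldl (pvStep (a.length : Int))
        (((PySem.List.enumerate a).foldl (pvStep (a.length : Int))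
            (PySem.Set.empty, 1000000001)).1, 1000000001)).1 with hS
    have hmemS : ∀ y : Int, y ∈ S ↔
        ∃ (k : Nat) (hk : k < a.length), y = (k : Int) ∧ 0 < y ∧ y < (a.length : Int) - 1 ∧
          (a[k] < pvM 1000000001 (a.take k) ∨
           a[k] < pvM 1000000001 ((a.drop (k + 1)).reverse)) := by
      intro y
      rw [hS, hbmem y, hfmem y]
      constructor
      · rintro ((hy | ⟨k, hk, hy0, hy1, hy2, hy3⟩) | ⟨k, hk, hy0, hy1, hy2, hy3⟩)
        · simp [PySem.Set.empty] at hy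
        · exact ⟨k, hk, by omega, hy1, hy2, Or.inl hy3⟩
        · exact ⟨k, hk, by omega, hy1, hy2, Or.inr hy3⟩
      · rintro ⟨k, hk, hy0, hy1, hy2, (hc | hc)⟩
        · exact Or.inl (Or.inr ⟨k, hk, by omega, hy1, hy2, hc⟩)
        · exact Or.inr ⟨k, hk, by omega, hy1, hy2, hc⟩
    have hperm : S.Perm ((PySem.List.pyRange 1 ((a.length : Int) - 1) 1).filter
        (fun i => decide (P i))) := by
      refine (List.perm_ext_iff_of_nodup hbnd
        ((PySem.List.nodup_pyRange_one 1 ((a.length : Int) - 1)).filter _)).mpr ?_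
      intro y
      simp only [hmemS y, List.mem_filter, PySem.List.mem_pyRange_one, decide_eq_true_eq, hP]
      constructor
      · rintro ⟨k, hk, rfl, hy1, hy2, hc⟩
        refine ⟨⟨by omega, hy2⟩, ?_⟩
        rw [pvCondIff a _ (by omega) hy2]
        rw [show ((k : Int)).toNat = k from by omega, List.getD_eq_getElem a 0 hk]
        exact hc
      · rintro ⟨⟨hy1, hy2⟩, hc⟩
        rw [pvCondIff a _ (by omega) hy2] at hc
        have hk : y.toNat < a.length := by omega
        rw [List.getD_eq_getElem a 0 hk] at hc
        exact ⟨y.toNat, hk, by omega, by omega, hy2, hc⟩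
    have hlen : S.length = ((PySem.List.pyRange 1 ((a.length : Int) - 1) 1).filter
        (fun i => decide (P i))).length := hperm.length_eq
    simp only [PySem.Set.len, List.countP_eq_length_filter, hlen]
    push_cast
    ring
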